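-- pv_equiv track=rewrite | github.com/ArturFartukh/Python_Core_Go_IT | go_it-python_core_hw05/python_core_hw05-05.py | get_phone_numbers_for_countries
-- ===== SOURCE A (Python) =====
-- def sanitize_phone_number(phone):
--     new_phone = (
--         phone.strip()
--         .removeprefix("+")
--         .replace("(", "")
--         .replace(")", "")
--         .replace("-", "")
--         .replace(" ", "")
--     )
--     return new_phone
--
-- def get_phone_numbers_for_countries(list_phones):
--     numbers_of_Japan = []
--     numbers_of_Singapore = []
--     numbers_of_Taiwan = []
--     numbers_of_Ukreine = []
--     for number in list_phones:
--         number = sanitize_phone_number(number)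
--         if number.startswith("81"):
--             numbers_of_Japan.append(number)
--         elif number.startswith("65"):
--             numbers_of_Singapore.append(number)
--         elif number.startswith("886"):
--             numbers_of_Taiwan.append(number)
--         else:
--             numbers_of_Ukreine.append(number)
--     return {"UA": numbers_of_Ukreine, "JP": numbers_of_Japan, "TW": numbers_of_Taiwan, "SG": numbers_of_Singapore}
-- ===== SOURCE B (Python) =====
-- def sanitize_phone_number(phone):
--     new_phone = (
--         phone.strip()
--         .removeprefix("+")
--         .replace("(", "")
--         .replace(")", "")
--         .replace("-", "")
--         .replace(" ", "")
--     )
--     return new_phone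
--
-- def _classify(n):
--     if n.startswith("81"):
--         return "JP"
--     if n.startswith("65"):
--         return "SG"
--     if n.startswith("886"):
--         return "TW"
--     return "UA"
--
-- def get_phone_numbers_for_countries(list_phones):
--     sanitized = [sanitize_phone_number(p) for p in list_phones]
--     return {key: [n for n in sanitized if _classify(n) == key]
--             for key in ("UA", "JP", "TW", "SG")}
-- ===== Notes on version B (the rewrite author's own statement) =====
-- stated objective: simpler
-- what changed: Replaces A's single accumulating pass with four named mutable lists by staged passes: sanitize the whole list once, then build the result as a dict comprehension whose value for each country key is a filter of the sanitized list by a classify function.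
import Mathlib
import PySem

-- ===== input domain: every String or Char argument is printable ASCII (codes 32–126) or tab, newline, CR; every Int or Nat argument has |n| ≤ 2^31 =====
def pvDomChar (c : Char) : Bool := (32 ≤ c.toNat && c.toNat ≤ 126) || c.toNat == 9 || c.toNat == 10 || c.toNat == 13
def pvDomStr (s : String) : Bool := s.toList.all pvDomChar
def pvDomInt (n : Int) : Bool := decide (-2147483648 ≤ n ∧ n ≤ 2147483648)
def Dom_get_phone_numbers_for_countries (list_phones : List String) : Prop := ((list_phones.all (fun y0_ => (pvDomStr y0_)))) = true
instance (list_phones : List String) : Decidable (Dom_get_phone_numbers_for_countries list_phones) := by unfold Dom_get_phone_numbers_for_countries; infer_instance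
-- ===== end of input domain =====

-- B replaces A's single accumulating pass (four named lists, if/elif ladder) by staged passes:
-- sanitize the whole list once, then one filter of the sanitized list per country key (simpler).

-- shared same-module helper (used by both Pythons)
def sanitize_phone_number (phone : String) : String :=
  let s := PySem.Str.strip phone
  -- str.removeprefix("+"): drop the prefix iff present
  let s := if PySem.Str.startswith s "+" then PySem.Str.slice s (some 1) none else s
  let s := PySem.Str.replace s "(" ""
  let s := PySem.Str.replace s ")" ""
  let s := PySem.Str.replace s "-" ""
  PySem.Str.replace s " " ""

-- ===== PORT A =====
-- loop state: (numbers_of_Japan, numbers_of_Singapore, numbers_of_Taiwan, numbers_of_Ukreine)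
def pvBucketA (acc : List String × List String × List String × List String) (n : String) :
    List String × List String × List String × List String :=
  let (jp, sg, tw, ua) := acc
  if PySem.Str.startswith n "81" then (jp ++ [n], sg, tw, ua)
  else if PySem.Str.startswith n "65" then (jp, sg ++ [n], tw, ua)
  else if PySem.Str.startswith n "886" then (jp, sg, tw ++ [n], ua)
  else (jp, sg, tw, ua ++ [n])

def pvStepA (acc : List String × List String × List String × List String) (number : String) :
    List String × List String × List String × List String :=
  pvBucketA acc (sanitize_phone_number number)

def get_phone_numbers_for_countries (list_phones : List String) : List (String × List String) :=
  let st := list_phones.foldl pvStepA ([], [], [], [])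
  [("UA", st.2.2.2), ("JP", st.1), ("TW", st.2.2.1), ("SG", st.2.1)]

-- ===== PORT B =====
-- the classify helper: the country key of a sanitized number
def pvClassify (n : String) : String :=
  if PySem.Str.startswith n "81" then "JP"
  else if PySem.Str.startswith n "65" then "SG"
  else if PySem.Str.startswith n "886" then "TW"
  else "UA"

def get_phone_numbers_for_countries_alt (list_phones : List String) : List (String × List String) :=
  let sanitized := list_phones.map sanitize_phone_number
  ["UA", "JP", "TW", "SG"].map
    (fun key => (key, sanitized.filter (fun n => pvClassify n == key)))

-- ===== PRECONDITION & SPEC =====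
def Spec_get_phone_numbers_for_countries (list_phones : List String) (out : List (String × List String)) : Prop := out = get_phone_numbers_for_countries_alt list_phones
instance (list_phones : List String) (out : List (String × List String)) : Decidable (Spec_get_phone_numbers_for_countries list_phones out) := by unfold Spec_get_phone_numbers_for_countries; infer_instance

-- ===== CLAIM (what is proved, stated in full; the proofs are below) =====
def Claim_equal_get_phone_numbers_for_countries : Prop := ∀ (list_phones : List String), Dom_get_phone_numbers_for_countries list_phones → Spec_get_phone_numbers_for_countries list_phones (get_phone_numbers_for_countries list_phones)

-- ===== LEMMAS AND PROOFS =====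

-- A's fold over phones is the fold of the bucketing step over the sanitized list
lemma pv_fold_map (phones : List String)
    (st : List String × List String × List String × List String) :
    phones.foldl pvStepA st = (phones.map sanitize_phone_number).foldl pvBucketA st := by
  rw [List.foldl_map]; rfl

-- loop invariant: A's four accumulators are the initial ones extended by B's per-key filters
lemma pv_inv (ns : List String) (jp sg tw ua : List String) :
    ns.foldl pvBucketA (jp, sg, tw, ua)
    = (jp ++ ns.filter (fun n => pvClassify n == "JP"),
       sg ++ ns.filter (fun n => pvClassify n == "SG"),
       tw ++ ns.filter (fun n => pvClassify n == "TW"),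
       ua ++ ns.filter (fun n => pvClassify n == "UA")) := by
  induction ns generalizing jp sg tw ua with
  | nil => simp
  | cons n t ih =>
    simp only [List.foldl_cons, pvBucketA, pvClassify, List.filter_cons]
    by_cases h1 : PySem.Chars.startswith n.toList ['8', '1'] = true
    · simp [pvClassify, h1, ih]
    · by_cases h2 : PySem.Chars.startswith n.toList ['6', '5'] = true
      · simp [pvClassify, h1, h2, ih]
      · by_cases h3 : PySem.Chars.startswith n.toList ['8', '8', '6'] = true
        · simp [pvClassify, h1, h2, h3, ih]
        · simp [pvClassify, h1, h2, h3, ih]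

-- ===== VERDICT (by name: the statement is the Claim_ definition above) =====
theorem get_phone_numbers_for_countries_spec : Claim_equal_get_phone_numbers_for_countries := by
  intro phones _
  unfold Spec_get_phone_numbers_for_countries
  simp only [get_phone_numbers_for_countries, get_phone_numbers_for_countries_alt]
  rw [pv_fold_map, pv_inv]
  simp [List.map]
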